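-- pv_equiv track=rewrite | github.com/tony-728/Algorithm | python/programmers/Lev2/디팬스게임.py | solution
-- ===== SOURCE A (Python) =====
-- from heapq import heappush, heappop
-- from heapq import heappush, heappop
-- from heapq import heappush, heappop
--
-- def solution(n, k, enemy):
--     answer = 0
--
--     if k >= len(enemy):
--         answer = len(enemy)
--
--     else:
--         heap = []
--         for e in enemy:
--             n -= e
--
--             if n >= 0:
--                 heappush(heap, -e)
--             else:
--                 if k > 0:
--                     heappush(heap, -e)
--                     n -= heappop(heap)
--                     k -= 1
--                 else:
--                     break
--
--             answer += 1
--
--     return answer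
-- ===== SOURCE B (Python) =====
-- from bisect import insort
--
-- def solution(n, k, enemy):
--     # Per-stage feasibility on the sorted prefix instead of a heap greedy:
--     # stage m is survivable iff the sum of the smallest m-k of the first m
--     # enemies is <= n; that sum ('low') is maintained incrementally.
--     s = []
--     low = 0
--     m = 0
--     for e in enemy:
--         m += 1
--         if m > k:
--             low += e if k < 1 else min(e, s[m - 1 - k])
--             if low > n:
--                 return m - 1
--         insort(s, e)
--     return len(enemy)
-- ===== Notes on version B (the rewrite author's own statement) =====
-- stated objective: alternative
-- what changed: A simulates the run with a heap and a mutating budget n and immunity counter k (popping the max paid enemy on each shortfall); B keeps no budget or counter at all: it maintains the sorted prefix and an incrementally-updated sum of the smallest m-k enemies, checking per stage the closed feasibility predicate 'that sum <= n' and stopping at the first stage that fails.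
-- outside the precondition, e.g. on solution(0, 1, [10, -100, 50, 60]): A returns 3, B returns 4
import Mathlib
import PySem

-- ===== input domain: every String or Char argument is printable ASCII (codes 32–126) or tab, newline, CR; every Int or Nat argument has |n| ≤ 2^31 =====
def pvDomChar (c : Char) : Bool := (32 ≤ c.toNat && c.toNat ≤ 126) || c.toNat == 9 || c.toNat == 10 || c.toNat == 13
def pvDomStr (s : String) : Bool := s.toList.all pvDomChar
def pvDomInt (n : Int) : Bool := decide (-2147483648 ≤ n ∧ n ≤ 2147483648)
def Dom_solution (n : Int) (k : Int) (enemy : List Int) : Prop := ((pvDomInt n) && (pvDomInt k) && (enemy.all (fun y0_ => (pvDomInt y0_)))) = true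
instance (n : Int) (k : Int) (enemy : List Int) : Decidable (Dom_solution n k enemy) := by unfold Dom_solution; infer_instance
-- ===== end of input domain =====

-- B replaces A's heap-greedy (mutating budget n and immunity count k) by a per-stage
-- feasibility test on the sorted prefix: stage m is survivable iff the sum of the
-- smallest m-k of the first m enemies is ≤ n.  Objective: alternative decomposition.

-- ===== PORT A =====
-- heapq on a list of Ints: modelled by a sorted-ascending list; heappush inserts in
-- order, heappop takes the head (= the minimum) — exactly heapq's observable behaviour.
def hpush (h : List Int) (x : Int) : List Int :=
  match h with
  | [] => [x]
  | y :: t => if x < y then x :: y :: t else y :: hpush t x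

def solLoopA (n k : Int) (heap : List Int) (answer : Int) : List Int → Int
  | [] => answer
  | e :: rest =>
    let n1 := n - e
    if 0 ≤ n1 then
      solLoopA n1 k (hpush heap (-e)) (answer + 1) rest
    else if 0 < k then
      match hpush heap (-e) with
      | [] => answer            -- unreachable: hpush never returns []
      | p :: h1 => solLoopA (n1 - p) (k - 1) h1 (answer + 1) rest
    else answer

def solution (n : Int) (k : Int) (enemy : List Int) : Int :=
  if (enemy.length : Int) ≤ k then (enemy.length : Int)
  else solLoopA n k [] 0 enemy

-- ===== PORT B =====
-- bisect.insort (insert after equal elements, list stays sorted ascending)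
def insortB (s : List Int) (x : Int) : List Int :=
  match s with
  | [] => [x]
  | y :: t => if x < y then x :: y :: t else y :: insortB t x

-- the index s[m-1-k] is exact as getD (m1-1-k).toNat since where it is read
-- (m1 > k ≥ 1) it is provably in range; the two nested ifs of the Python body are
-- fused into 'if m1 > k ∧ low1 > n', which follows the same control flow
def altLoop (n k : Int) (s : List Int) (low m : Int) : List Int → Int
  | [] => m                     -- loop exhausted: m = len(enemy)
  | e :: rest =>
    let m1 := m + 1
    let low1 := if m1 > k then
        low + (if k < 1 then e else min e (s.getD (m1 - 1 - k).toNat 0))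
      else low
    if m1 > k ∧ n < low1 then m1 - 1
    else altLoop n k (insortB s e) low1 m1 rest

def solution_alt (n : Int) (k : Int) (enemy : List Int) : Int :=
  altLoop n k [] 0 0 enemy

-- ===== PRECONDITION & SPEC =====
-- Pre_ excludes only inputs with a negative enemy value on which an immunity can
-- actually be spent (0 < k < len): negative damage is outside the game's natural
-- domain, and there A's online heap greedy and B's offline prefix-feasibility test
-- are both defensible and can legitimately diverge (see the cited example).
def Pre_solution (n : Int) (k : Int) (enemy : List Int) : Prop :=
  (∀ e ∈ enemy, 0 ≤ e) ∨ k ≤ 0 ∨ (enemy.length : Int) ≤ k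
instance (n : Int) (k : Int) (enemy : List Int) : Decidable (Pre_solution n k enemy) := by unfold Pre_solution; infer_instance

def pvWitness_solution : Int × Int × List Int := (10, 1, [3, 5, 4])

def Spec_solution (n : Int) (k : Int) (enemy : List Int) (out : Int) : Prop := out = solution_alt n k enemy
instance (n : Int) (k : Int) (enemy : List Int) (out : Int) : Decidable (Spec_solution n k enemy out) := by unfold Spec_solution; infer_instance

-- ===== CLAIM (what is proved, stated in full; the proofs are below) =====
def Claim_equal_solution : Prop := ∀ (n : Int) (k : Int) (enemy : List Int), Dom_solution n k enemy → Pre_solution n k enemy → Spec_solution n k enemy (solution n k enemy)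

-- ===== LEMMAS AND PROOFS =====

theorem insortB_perm (l : List Int) (x : Int) : (insortB l x).Perm (x :: l) := by
  induction l with
  | nil => simp [insortB]
  | cons y t ih =>
    simp only [insortB]
    split
    · exact List.Perm.refl _
    · exact (List.Perm.cons y ih).trans (List.Perm.swap x y t)

theorem hpush_eq_insortB (l : List Int) (x : Int) : hpush l x = insortB l x := by
  induction l with
  | nil => rfl
  | cons y t ih => simp only [hpush, insortB, ih]

theorem insortB_mem {l : List Int} {x y : Int} (h : y ∈ insortB l x) : y = x ∨ y ∈ l := by
  have := (insortB_perm l x).mem_iff.mp h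
  simpa using this

theorem insortB_sorted {l : List Int} (h : l.Pairwise (· ≤ ·)) (x : Int) :
    (insortB l x).Pairwise (· ≤ ·) := by
  induction l with
  | nil => simp [insortB]
  | cons y t ih =>
    rcases List.pairwise_cons.mp h with ⟨hy, ht⟩
    simp only [insortB]
    split
    · rename_i hlt
      refine List.pairwise_cons.mpr ⟨?_, h⟩
      intro b hb
      rcases List.mem_cons.mp hb with rfl | hb
      · omega
      · exact le_trans (le_of_lt hlt) (hy b hb)
    · rename_i hge
      refine List.pairwise_cons.mpr ⟨?_, ih ht⟩
      intro b hb
      rcases insortB_mem hb with rfl | hb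
      · omega
      · exact hy b hb

theorem insortB_sum (l : List Int) (x : Int) : (insortB l x).sum = x + l.sum :=
  ((insortB_perm l x).sum_eq).trans (by simp)

theorem insortB_length (l : List Int) (x : Int) : (insortB l x).length = l.length + 1 :=
  ((insortB_perm l x).length_eq).trans (by simp)

-- appending at the end when x is ≥ everything
theorem insortB_append_last {l : List Int} {x : Int} (h : ∀ z ∈ l, ¬ x < z) :
    insortB l x = l ++ [x] := by
  induction l with
  | nil => rfl
  | cons y t ih =>
    simp only [insortB]
    rw [if_neg (h y (by simp))]
    simp [ih (fun z hz => h z (by simp [hz]))]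

-- sorted lists with the same multiset are equal
theorem sorted_ext {l₁ l₂ : List Int} (hp : l₁.Perm l₂)
    (h₁ : l₁.Pairwise (· ≤ ·)) (h₂ : l₂.Pairwise (· ≤ ·)) : l₁ = l₂ :=
  List.Perm.eq_of_pairwise (fun a b _ _ hab hba => le_antisymm hab hba) h₁ h₂ hp

-- inserting below a sorted tail
theorem insortB_append {w P : List Int} {x : Int}
    (hs : (w ++ P).Pairwise (· ≤ ·)) (hx : ∀ p ∈ P, x ≤ p) :
    insortB (w ++ P) x = insortB w x ++ P := by
  rcases List.pairwise_append.mp hs with ⟨hw, hP, hcross⟩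
  refine sorted_ext ?_ (insortB_sorted hs x) ?_
  · exact (insortB_perm _ x).trans ((insortB_perm w x).symm.append_right P)
  · refine List.pairwise_append.mpr ⟨insortB_sorted hw x, hP, ?_⟩
    intro a ha b hb
    rcases insortB_mem ha with rfl | h
    · exact hx b hb
    · exact hcross a h b hb

theorem sorted_revneg {l : List Int} (h : l.Pairwise (· ≤ ·)) :
    ((l.map (fun x => -x)).reverse).Pairwise (· ≤ ·) := by
  rw [List.pairwise_reverse, List.pairwise_map]
  exact h.imp (by intro a b hab; simp; omega)

-- bridge: pushing -e into the reversed-negated image of a sorted list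
theorem hpush_revneg {l : List Int} (h : l.Pairwise (· ≤ ·)) (e : Int) :
    hpush ((l.map (fun x => -x)).reverse) (-e)
      = ((insortB l e).map (fun x => -x)).reverse := by
  rw [hpush_eq_insortB]
  refine sorted_ext ?_ (insortB_sorted (sorted_revneg h) (-e)) (sorted_revneg (insortB_sorted h e))
  refine (insortB_perm _ _).trans ?_
  refine List.Perm.trans ?_ (List.reverse_perm _).symm
  exact (List.Perm.cons _ (List.reverse_perm _)).trans ((insortB_perm l e).map _).symm

theorem revneg_cons {l : List Int} (h : l ≠ []) :
    (l.map (fun x => -x)).reverse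
      = -(l.getLast h) :: ((l.dropLast.map (fun x => -x)).reverse) := by
  conv_lhs => rw [← List.dropLast_append_getLast h]
  simp

theorem sorted_le_getLast {l : List Int} (hs : l.Pairwise (· ≤ ·)) {x : Int}
    (hx : x ∈ l) (h : l ≠ []) : x ≤ l.getLast h := by
  have heq := List.dropLast_append_getLast h
  rw [← heq] at hs hx
  rcases List.mem_append.mp hx with hx2 | hx2
  · exact (List.pairwise_append.mp hs).2.2 x hx2 _ (by simp)
  · simp at hx2; omega

theorem sum_take_le {l : List Int} (hl : ∀ x ∈ l, 0 ≤ x) (q : ℕ) :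
    (l.take q).sum ≤ l.sum := by
  conv_rhs => rw [← List.take_append_drop q l]
  rw [List.sum_append]
  have : (0:Int) ≤ (l.drop q).sum :=
    List.sum_nonneg (fun x hx => hl x (List.mem_of_mem_drop hx))
  omega

theorem sum_take_mono {l : List Int} (hl : ∀ x ∈ l, 0 ≤ x) {r q : ℕ} (h : r ≤ q) :
    (l.take r).sum ≤ (l.take q).sum := by
  have h2 : l.take r = (l.take q).take r := by rw [List.take_take, min_eq_left h]
  rw [h2]
  exact sum_take_le (fun x hx => hl x (List.mem_of_mem_take hx)) r

theorem altLoop_big (rest : List Int) : ∀ (n k low m : Int) (s : List Int),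
    m + rest.length ≤ k → altLoop n k s low m rest = m + rest.length := by
  induction rest with
  | nil => intro n k low m s h; simp [altLoop]
  | cons e t ih =>
    intro n k low m s h
    simp only [altLoop]
    rw [if_neg]
    · rw [if_neg (by simp at h ⊢; omega)]
      have := ih n k low (m + 1) (insortB s e) (by simp at h ⊢; omega)
      rw [this]; simp at h ⊢; omega
    · simp at h ⊢
      intro h1; omega

-- the head of a sorted list bounds every getD within range
theorem sorted_le_getD {s : List Int} (hs : s.Pairwise (· ≤ ·)) {y : Int} {b : ℕ}
    (hy : ∀ x ∈ s, y ≤ x) (hb : b < s.length) : y ≤ s.getD b 0 := by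
  rw [List.getD_eq_getElem s 0 hb]
  exact hy _ (List.getElem_mem hb)

-- incremental update of the bottom-(b+1) sum under sorted insertion
theorem insort_take_succ_sum {s : List Int} (hs : s.Pairwise (· ≤ ·)) (e : Int) :
    ∀ {b : ℕ}, b < s.length →
    ((insortB s e).take (b + 1)).sum = (s.take b).sum + min e (s.getD b 0) := by
  induction s with
  | nil => intro b hb; simp at hb
  | cons y t ih =>
    intro b hb
    obtain ⟨hy, htS⟩ := List.pairwise_cons.mp hs
    simp only [insortB]
    split
    · rename_i hlt
      have hyx : ∀ x ∈ y :: t, y ≤ x := by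
        intro x hx
        rcases List.mem_cons.mp hx with rfl | hx
        · exact le_rfl
        · exact hy x hx
      have hmin : min e ((y :: t).getD b 0) = e := by
        have h1 : y ≤ (y :: t).getD b 0 := sorted_le_getD hs hyx hb
        omega
      rw [hmin, List.take_succ_cons, List.sum_cons]
      omega
    · rename_i hge
      cases b with
      | zero =>
        simp only [List.getD_cons_zero, List.take_succ_cons, List.take_zero,
          List.sum_cons, List.sum_nil]
        omega
      | succ b' =>
        have hb' : b' < t.length := by simpa using hb
        rw [List.getD_cons_succ, List.take_succ_cons, List.take_succ_cons,
          List.sum_cons, List.sum_cons, ih htS hb']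
        omega

-- one B-step of the maintained low: it stays the bottom-((m+1)-k) sum after insertion
theorem low1_step {s : List Int} (hs : s.Pairwise (· ≤ ·)) (e k0 : Int)
    (hgt : (s.length : Int) + 1 > k0) :
    ((s.take (((s.length : Int) - k0).toNat)).sum
      + (if k0 < 1 then e else min e (s.getD (((s.length : Int) + 1 - 1 - k0).toNat) 0)))
    = ((insortB s e).take (((s.length : Int) + 1 - k0).toNat)).sum := by
  by_cases hk : k0 < 1
  · rw [if_pos hk, List.take_of_length_le (by omega),
      List.take_of_length_le (by rw [insortB_length]; omega), insortB_sum]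
    omega
  · rw [if_neg hk]
    have hb : (((s.length : Int) - k0).toNat) < s.length := by omega
    have he : (((s.length : Int) + 1 - 1 - k0).toNat) = (((s.length : Int) - k0).toNat) := by
      omega
    have h2 : (((s.length : Int) + 1 - k0).toNat) = (((s.length : Int) - k0).toNat) + 1 := by
      omega
    rw [he, h2, insort_take_succ_sum hs e hb]

-- when k ≤ 0 no immunity is ever spent: A is a plain running-sum break,
-- B's take covers the whole prefix — they agree for arbitrary (even negative) enemies
theorem main_negk (rest : List Int) : ∀ (s heap : List Int) (n0 k0 : Int), k0 ≤ 0 →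
    solLoopA (n0 - s.sum) k0 heap (s.length : Int) rest
      = altLoop n0 k0 s s.sum (s.length : Int) rest := by
  induction rest with
  | nil => intro s heap n0 k0 hk; simp [solLoopA, altLoop]
  | cons e t ih =>
    intro s heap n0 k0 hk
    simp only [solLoopA, altLoop]
    rw [if_pos (by omega : ((s.length : Int) + 1 > k0)), if_pos (by omega : k0 < 1)]
    by_cases hA : 0 ≤ n0 - s.sum - e
    · rw [if_pos hA, if_neg (by omega)]
      have := ih (insortB s e) (hpush heap (-e)) n0 k0 hk
      rw [insortB_sum, insortB_length] at this
      have e1 : n0 - (e + s.sum) = n0 - s.sum - e := by ring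
      have e2 : ((s.length + 1 : Nat) : Int) = (s.length : Int) + 1 := by push_cast; ring
      have e3 : e + s.sum = s.sum + e := by ring
      rw [e1, e2, e3] at this
      exact this
    · rw [if_neg hA, if_neg (by omega : ¬ 0 < k0), if_pos (by constructor <;> omega)]
      omega

-- the main invariant induction: greedy state ↔ sorted-prefix decomposition w ++ P
-- (w = enemies currently "paid for", P = the popped = immunised ones)
theorem main_loop (rest : List Int) : ∀ (w P : List Int) (n0 k0 : Int),
    (∀ e ∈ rest, 0 ≤ e) → (∀ e ∈ w, 0 ≤ e) → (∀ e ∈ P, 0 ≤ e) →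
    ((w ++ P).Pairwise (· ≤ ·)) →
    (P.length ≤ k0.toNat) →
    (∀ p ∈ P, n0 - w.sum < p) →
    (0 ≤ n0 - w.sum ∨ w = []) →
    solLoopA (n0 - w.sum) (k0 - P.length) ((w.map (fun x => -x)).reverse)
        ((w.length : Int) + P.length) rest
      = altLoop n0 k0 (w ++ P)
          (((w ++ P).take ((((w.length : Int) + P.length) - k0).toNat)).sum)
          ((w.length : Int) + P.length) rest := by
  induction rest with
  | nil =>
    intro w P n0 k0 _ _ _ _ _ _ _
    simp [solLoopA, altLoop]
  | cons e t ih =>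
    intro w P n0 k0 hrest hw0 hP0 hsort hjk hPgt hn6
    have he0 : (0:Int) ≤ e := hrest e (by simp)
    have ht0 : ∀ x ∈ t, (0:Int) ≤ x := fun x hx => hrest x (by simp [hx])
    obtain ⟨hwS, hPS, hcross⟩ := List.pairwise_append.mp hsort
    have hwP0 : ∀ x ∈ w ++ P, (0:Int) ≤ x := by
      intro x hx; rcases List.mem_append.mp hx with h | h
      · exact hw0 x h
      · exact hP0 x h
    have hs'0 : ∀ x ∈ insortB (w ++ P) e, (0:Int) ≤ x := by
      intro x hx; rcases insortB_mem hx with rfl | hx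
      · exact he0
      · exact hwP0 x hx
    have hmlen : ((w ++ P).length : Int) = (w.length : Int) + P.length := by
      rw [List.length_append]; push_cast; ring
    have hlow1 : ((w.length : Int) + P.length) + 1 > k0 →
        ((w ++ P).take ((((w.length : Int) + P.length) - k0).toNat)).sum
          + (if k0 < 1 then e
             else min e ((w ++ P).getD ((((w.length : Int) + P.length) + 1 - 1 - k0).toNat) 0))
        = ((insortB (w ++ P) e).take ((((w.length : Int) + P.length) + 1 - k0).toNat)).sum := by
      intro hgt
      have h1 := low1_step hsort e k0 (by rw [hmlen]; omega)
      rw [hmlen] at h1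
      exact h1
    simp only [solLoopA, altLoop]
    by_cases hA : 0 ≤ n0 - w.sum - e
    · -- (a) plain push: both loops continue
      rw [if_pos hA]
      have hxP : ∀ p ∈ P, e ≤ p := fun p hp => le_of_lt (by have := hPgt p hp; omega)
      have hs' : insortB (w ++ P) e = insortB w e ++ P := insortB_append hsort hxP
      have hw'sum : (insortB w e).sum = e + w.sum := insortB_sum w e
      have hw'len : (insortB w e).length = w.length + 1 := insortB_length w e
      have hw'0 : ∀ x ∈ insortB w e, (0:Int) ≤ x := by
        intro x hx; rcases insortB_mem hx with rfl | hx
        · exact he0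
        · exact hw0 x hx
      have hcond : ¬ (((w.length:Int) + P.length + 1 > k0) ∧
          n0 < ((insortB (w ++ P) e).take (((w.length:Int) + P.length + 1 - k0).toNat)).sum) := by
        rintro ⟨hgt, hsum⟩
        by_cases hPnil : P = []
        · subst hPnil
          rw [hs'] at hsum
          have h1 := sum_take_le (l := insortB w e ++ []) (by simpa using hw'0)
            (((w.length:Int) + ([]:List Int).length + 1 - k0).toNat)
          simp only [List.append_nil] at h1 hsum
          rw [hw'sum] at h1
          omega
        · have hplen : 1 ≤ P.length := by
            cases P with
            | nil => exact absurd rfl hPnil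
            | cons _ _ => simp
          have hkk : (P.length : Int) ≤ k0 := by omega
          have hq : (((w.length:Int) + P.length + 1 - k0).toNat) ≤ (insortB w e).length := by
            rw [hw'len]; omega
          rw [hs', List.take_append_of_le_length hq] at hsum
          have h1 := sum_take_le hw'0 (((w.length:Int) + P.length + 1 - k0).toNat)
          rw [hw'sum] at h1
          omega
      rw [hpush_revneg hwS e]
      have hsort' : ((insortB w e) ++ P).Pairwise (· ≤ ·) := by
        refine List.pairwise_append.mpr ⟨insortB_sorted hwS e, hPS, ?_⟩
        intro a ha b hb
        rcases insortB_mem ha with rfl | ha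
        · exact hxP b hb
        · exact hcross a ha b hb
      have hPgt' : ∀ p ∈ P, n0 - (insortB w e).sum < p := by
        intro p hp; rw [hw'sum]; have := hPgt p hp; omega
      have hrec := ih (insortB w e) P n0 k0 ht0 hw'0 hP0 hsort' hjk hPgt'
        (by left; rw [hw'sum]; omega)
      rw [hw'sum, hw'len] at hrec
      have e1 : n0 - (e + w.sum) = n0 - w.sum - e := by ring
      have e2 : ((w.length + 1 : Nat) : Int) + P.length = (w.length:Int) + P.length + 1 := by
        push_cast; ring
      rw [e1, e2] at hrec
      by_cases hgt : ((w.length : Int) + P.length) + 1 > k0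
      · rw [if_pos hgt, hlow1 hgt, if_neg hcond, hs']
        exact hrec
      · rw [if_neg hgt, if_neg (fun h => hgt h.1)]
        have h0 : ((w ++ P).take ((((w.length : Int) + P.length) - k0).toNat)).sum
            = ((insortB w e ++ P).take ((((w.length : Int) + P.length) + 1 - k0).toNat)).sum := by
          rw [show ((((w.length : Int) + P.length) - k0).toNat) = 0 from by omega,
            show ((((w.length : Int) + P.length) + 1 - k0).toNat) = 0 from by omega]
          simp
        rw [hs', h0]
        exact hrec
    · rw [if_neg hA]
      by_cases hB : 0 < k0 - (P.length : Int)
      · -- (b) pop: immunity spent on the current maximum; both loops continue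
        rw [if_pos hB]
        have hXne : insortB w e ≠ [] := by
          intro h
          have := insortB_length w e
          rw [h] at this
          simp at this
        set X := insortB w e with hX
        set g := X.getLast hXne with hg
        have hXS : X.Pairwise (· ≤ ·) := insortB_sorted hwS e
        have hXsum : X.sum = e + w.sum := insortB_sum w e
        have hXlen : X.length = w.length + 1 := insortB_length w e
        have hXd : X.dropLast ++ [g] = X := List.dropLast_append_getLast hXne
        have hwdS : X.dropLast.Pairwise (· ≤ ·) :=
          List.Pairwise.sublist (List.dropLast_sublist X) hXS
        have hgmax : ∀ x ∈ X, x ≤ g := fun x hx => sorted_le_getLast hXS hx hXne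
        have heg : e ≤ g := hgmax e ((insortB_perm w e).mem_iff.mpr (by simp))
        have hX0 : ∀ x ∈ X, (0:Int) ≤ x := by
          intro x hx
          rcases insortB_mem hx with rfl | hx'
          · exact he0
          · exact hw0 x hx'
        have hg0 : (0:Int) ≤ g := le_trans he0 heg
        have hdsum : X.dropLast.sum = e + w.sum - g := by
          have h1 := congrArg List.sum hXd
          rw [List.sum_append] at h1
          simp only [List.sum_cons, List.sum_nil, add_zero] at h1
          omega
        have hdlen : X.dropLast.length = w.length := by
          rw [List.length_dropLast, hXlen]
          omega
        have hd0 : ∀ x ∈ X.dropLast, (0:Int) ≤ x :=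
          fun x hx => hX0 x (List.Sublist.mem hx (List.dropLast_sublist X))
        have hKdKg : (∀ x ∈ X.dropLast, ∀ p ∈ P, x ≤ p) ∧ (∀ p ∈ P, g ≤ p ∨ g = e) := by
          by_cases HC : ∀ z ∈ w, z < e
          · have hgl : g = e := by
              rcases insortB_mem (List.getLast_mem hXne) with h | h
              · exact h
              · have := HC g h
                omega
            have hXeq : X = w ++ [e] :=
              hX.trans (insortB_append_last (fun z hz => by have := HC z hz; omega))
            have hdl : X.dropLast = w := by rw [hXeq, List.dropLast_concat]
            refine ⟨?_, fun p hp => Or.inr hgl⟩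
            rw [hdl]
            exact fun x hx p hp => hcross x hx p hp
          · obtain ⟨z, hz, hze⟩ : ∃ z ∈ w, e ≤ z := by
              by_contra hno
              exact HC (fun z hz => by
                by_contra hlt
                exact hno ⟨z, hz, by omega⟩)
            have K1 : ∀ x ∈ X, ∀ p ∈ P, x ≤ p := by
              intro x hx p hp
              rcases insortB_mem hx with rfl | hx'
              · exact le_trans hze (hcross z hz p hp)
              · exact hcross x hx' p hp
            exact ⟨fun x hx p hp => K1 x (List.Sublist.mem hx (List.dropLast_sublist X)) p hp,
                   fun p hp => Or.inl (K1 g (List.getLast_mem hXne) p hp)⟩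
        have hsort' : (X.dropLast ++ insortB P g).Pairwise (· ≤ ·) := by
          refine List.pairwise_append.mpr ⟨hwdS, insortB_sorted hPS g, ?_⟩
          intro a ha b hb
          rcases insortB_mem hb with rfl | hb'
          · exact hgmax a (List.Sublist.mem ha (List.dropLast_sublist X))
          · exact hKdKg.1 a ha b hb'
        have hs'eq : insortB (w ++ P) e = X.dropLast ++ insortB P g := by
          refine sorted_ext ((insortB_perm _ _).trans ?_) (insortB_sorted hsort e) hsort'
          refine List.Perm.trans ?_ (List.Perm.append_left _ (insortB_perm P g).symm)
          have h2 : X.dropLast ++ (g :: P) = (X.dropLast ++ [g]) ++ P := by simp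
          rw [h2, hXd, hX]
          exact (insortB_perm w e).symm.append_right P
        have hP'len : (insortB P g).length = P.length + 1 := insortB_length P g
        have hcond : ¬ (((w.length:Int) + P.length + 1 > k0) ∧
            n0 < ((insortB (w ++ P) e).take (((w.length:Int) + P.length + 1 - k0).toNat)).sum) := by
          rintro ⟨hgt, hsum⟩
          have hq : (((w.length:Int) + P.length + 1 - k0).toNat) ≤ X.dropLast.length := by
            rw [hdlen]
            rcases hn6 with h6 | h6
            · omega
            · omega
          rw [hs'eq, List.take_append_of_le_length hq] at hsum
          have h1 := sum_take_le hd0 (((w.length:Int) + P.length + 1 - k0).toNat)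
          rw [hdsum] at h1
          rcases hn6 with h6 | h6
          · omega
          · have hw0len : w.length = 0 := by rw [h6]; rfl
            omega
        rw [hpush_revneg hwS e, ← hX, revneg_cons hXne, ← hg]
        have hP'0 : ∀ x ∈ insortB P g, (0:Int) ≤ x := by
          intro x hx
          rcases insortB_mem hx with rfl | hx'
          · exact hg0
          · exact hP0 x hx'
        have hjk' : (insortB P g).length ≤ k0.toNat := by rw [hP'len]; omega
        have hPgt' : ∀ p ∈ insortB P g, n0 - X.dropLast.sum < p := by
          intro p hp
          rw [hdsum]
          rcases insortB_mem hp with rfl | hp'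
          · omega
          · rcases hKdKg.2 p hp' with h | h
            · omega
            · have := hPgt p hp'
              omega
        have hn6' : 0 ≤ n0 - X.dropLast.sum ∨ X.dropLast = [] := by
          rcases hn6 with h6 | h6
          · left; rw [hdsum]; omega
          · right; rw [hX, h6]; rfl
        have hrec := ih X.dropLast (insortB P g) n0 k0 ht0 hd0 hP'0 hsort' hjk' hPgt' hn6'
        rw [hdsum, hdlen, hP'len] at hrec
        have e1 : n0 - (e + w.sum - g) = n0 - w.sum - e - -g := by ring
        have e2 : k0 - ((P.length + 1 : Nat) : Int) = k0 - P.length - 1 := by push_cast; ring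
        have e3 : ((w.length : Nat) : Int) + ((P.length + 1 : Nat) : Int)
            = (w.length:Int) + P.length + 1 := by push_cast; ring
        rw [e1, e2, e3] at hrec
        by_cases hgt : ((w.length : Int) + P.length) + 1 > k0
        · rw [if_pos hgt, hlow1 hgt, if_neg hcond, hs'eq]
          exact hrec
        · rw [if_neg hgt, if_neg (fun h => hgt h.1)]
          have h0 : ((w ++ P).take ((((w.length : Int) + P.length) - k0).toNat)).sum
              = ((X.dropLast ++ insortB P g).take
                  ((((w.length : Int) + P.length) + 1 - k0).toNat)).sum := by
            rw [show ((((w.length : Int) + P.length) - k0).toNat) = 0 from by omega,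
              show ((((w.length : Int) + P.length) + 1 - k0).toNat) = 0 from by omega]
            simp
          rw [hs'eq, h0]
          exact hrec
      · -- (c) break: both loops stop here
        rw [if_neg hB]
        have hkP : k0 ≤ (P.length:Int) := by omega
        have hcond : ((w.length:Int) + P.length + 1 > k0) ∧
            n0 < ((insortB (w ++ P) e).take (((w.length:Int) + P.length + 1 - k0).toNat)).sum := by
          refine ⟨by omega, ?_⟩
          have hq : w.length + 1 ≤ (((w.length:Int) + P.length + 1 - k0).toNat) := by omega
          refine lt_of_lt_of_le ?_ (sum_take_mono hs'0 hq)
          cases P with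
          | nil =>
            have hs' : insortB (w ++ []) e = insortB w e ++ [] :=
              insortB_append hsort (by simp)
            rw [hs', List.append_nil,
              List.take_of_length_le (by rw [insortB_length]), insortB_sum]
            omega
          | cons p0 P' =>
            by_cases hep : e ≤ p0
            · have hxP : ∀ p ∈ p0 :: P', e ≤ p := by
                intro p hp
                rcases List.mem_cons.mp hp with rfl | hp
                · exact hep
                · have := (List.pairwise_cons.mp hPS).1 p hp; omega
              have hs' : insortB (w ++ p0 :: P') e = insortB w e ++ p0 :: P' :=
                insortB_append hsort hxP
              rw [hs', List.take_append_of_le_length (by rw [insortB_length]),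
                List.take_of_length_le (by rw [insortB_length]), insortB_sum]
              omega
            · have hs2 : insortB (w ++ p0 :: P') e = (w ++ [p0]) ++ insortB P' e := by
                refine sorted_ext ((insortB_perm _ _).trans ?_) (insortB_sorted hsort e) ?_
                · refine List.Perm.trans ?_
                    (List.Perm.append_left (w ++ [p0]) (insortB_perm P' e).symm)
                  rw [List.append_assoc]
                  exact (List.perm_middle.symm).trans
                    (List.Perm.append_left w (List.Perm.swap p0 e P'))
                · refine List.pairwise_append.mpr
                    ⟨?_, insortB_sorted (List.pairwise_cons.mp hPS).2 e, ?_⟩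
                  · refine List.pairwise_append.mpr ⟨hwS, List.pairwise_singleton _ _, ?_⟩
                    intro a ha b hb
                    simp only [List.mem_singleton] at hb
                    exact hcross a ha b (by simp [hb])
                  · intro a ha b hb
                    have hb' := insortB_mem hb
                    rcases List.mem_append.mp ha with ha | ha
                    · rcases hb' with rfl | hb'
                      · have := hcross a ha p0 (by simp); omega
                      · exact hcross a ha b (by simp [hb'])
                    · simp only [List.mem_singleton] at ha; subst ha
                      rcases hb' with rfl | hb'
                      · omega
                      · exact (List.pairwise_cons.mp hPS).1 b hb'
              rw [hs2, List.take_append_of_le_length (by simp),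
                List.take_of_length_le (by simp), List.sum_append]
              have := hPgt p0 (by simp)
              simp
              omega
        rw [if_pos hcond.1]
        have hcnew : ((w.length:Int) + P.length + 1 > k0) ∧
            n0 < ((w ++ P).take ((((w.length : Int) + P.length) - k0).toNat)).sum
              + (if k0 < 1 then e
                 else min e ((w ++ P).getD ((((w.length : Int) + P.length) + 1 - 1 - k0).toNat) 0)) :=
          ⟨hcond.1, by rw [hlow1 hcond.1]; exact hcond.2⟩
        rw [if_pos hcnew]
        omega

-- ===== VERDICT (by name: the statement is the Claim_ definition above) =====
theorem solution_spec : Claim_equal_solution := by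
  intro n k enemy _ hpre
  unfold Spec_solution solution solution_alt
  split
  · rename_i hk
    have := altLoop_big enemy n k 0 0 [] (by simpa using hk)
    simp at this ⊢
    omega
  · rename_i hk
    rcases hpre with hpre | hpre | hpre
    · have := main_loop enemy [] [] n k hpre (by simp) (by simp) (by simp) (by simp)
        (by simp) (by simp)
      simpa using this
    · have := main_negk enemy [] [] n k hpre
      simpa using this
    · exact absurd hpre hk
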